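-- pv_equiv track=rewrite | github.com/xenophobed/isA_MCP | tools/services/user_service/services/analytics/ml/user_behavior_analytics/sub_services/user_needs_predictor.py | _predict_context_needs
-- ===== SOURCE A (Python) =====
-- from typing import Dict, Any, List, Optional, TYPE_CHECKING
--
-- def _predict_context_needs(
--
--     context: Dict[str, Any],
--     current_session: Optional[Dict[str, Any]],
--     predicted_tasks: List[str]
-- ) -> Dict[str, Any]:
--     """Predict context information needs"""
--     context_needs = {
--         "session_continuity": False,
--         "memory_context": False,
--         "user_preferences": False,
--         "historical_data": False,
--         "external_data": False
--     }
--
--     # Session continuity needs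
--     if current_session and current_session.get("message_count", 0) > 0:
--         context_needs["session_continuity"] = True
--
--     # Memory context needs for certain tasks
--     memory_tasks = ["memory_search", "context_retrieval", "task_continuation", "research"]
--     if any(task in predicted_tasks for task in memory_tasks):
--         context_needs["memory_context"] = True
--
--     # User preferences for personalized tasks
--     personalized_tasks = ["visualization", "analysis", "summarization"]
--     if any(task in predicted_tasks for task in personalized_tasks):
--         context_needs["user_preferences"] = True
--
--     # Historical data for analytical tasks
--     analytical_tasks = ["data_analysis", "statistical_analysis", "trend_analysis"]
--     if any(task in predicted_tasks for task in analytical_tasks):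
--         context_needs["historical_data"] = True
--
--     # External data for research tasks
--     research_tasks = ["research", "information_search", "fact_checking"]
--     if any(task in predicted_tasks for task in research_tasks):
--         context_needs["external_data"] = True
--
--     return context_needs
-- ===== SOURCE B (Python) =====
-- # Table-driven rewrite: one pass over predicted_tasks with a precomputed
-- # task -> [needs] map, instead of five separate any()-scans.
-- _NEED_TABLE = {
--     "memory_search": ["memory_context"],
--     "context_retrieval": ["memory_context"],
--     "task_continuation": ["memory_context"],
--     "research": ["memory_context", "external_data"],
--     "visualization": ["user_preferences"],
--     "analysis": ["user_preferences"],
--     "summarization": ["user_preferences"],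
--     "data_analysis": ["historical_data"],
--     "statistical_analysis": ["historical_data"],
--     "trend_analysis": ["historical_data"],
--     "information_search": ["external_data"],
--     "fact_checking": ["external_data"],
-- }
--
-- def _predict_context_needs(context, current_session, predicted_tasks):
--     context_needs = {
--         "session_continuity": False,
--         "memory_context": False,
--         "user_preferences": False,
--         "historical_data": False,
--         "external_data": False
--     }
--     if current_session and current_session.get("message_count", 0) > 0:
--         context_needs["session_continuity"] = True
--     for task in predicted_tasks:
--         for need in _NEED_TABLE.get(task, []):
--             context_needs[need] = True
--     return context_needs
-- ===== Notes on version B (the rewrite author's own statement) =====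
-- stated objective: simpler
-- what changed: Replaces the five hard-coded any()-scans over need-category task lists with a single pass over predicted_tasks driven by a precomputed task-to-needs table (inverting the loop nesting; 'research' maps to two needs).
import Mathlib
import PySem

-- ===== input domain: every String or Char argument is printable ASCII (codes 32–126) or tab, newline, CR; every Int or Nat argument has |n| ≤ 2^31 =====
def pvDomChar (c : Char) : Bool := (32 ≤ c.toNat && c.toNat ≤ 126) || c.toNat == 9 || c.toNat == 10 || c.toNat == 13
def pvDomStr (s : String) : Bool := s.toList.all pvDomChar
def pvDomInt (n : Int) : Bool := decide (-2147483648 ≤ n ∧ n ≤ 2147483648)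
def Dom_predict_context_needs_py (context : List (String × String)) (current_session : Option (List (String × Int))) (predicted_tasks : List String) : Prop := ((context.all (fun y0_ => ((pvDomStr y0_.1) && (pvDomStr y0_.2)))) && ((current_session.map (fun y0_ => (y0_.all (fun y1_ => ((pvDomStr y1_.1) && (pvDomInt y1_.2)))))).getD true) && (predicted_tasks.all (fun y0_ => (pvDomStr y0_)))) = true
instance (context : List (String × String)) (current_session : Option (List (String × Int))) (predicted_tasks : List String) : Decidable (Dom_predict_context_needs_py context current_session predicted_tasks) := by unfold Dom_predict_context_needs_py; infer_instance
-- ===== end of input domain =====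

-- B replaces A's five any()-scans over need-category task lists by one pass over
-- predicted_tasks driven by a precomputed task -> needs table (objective: simpler).

-- ===== PORT A =====
-- truthiness of current_session and the message_count check, shared by both ports verbatim
def pvSessionFlag (current_session : Option (List (String × Int))) : Bool :=
  match current_session with
  | none => false
  | some s => decide (s ≠ []) && decide (0 < (PySem.Dict.mk s).getD "message_count" 0)

def predict_context_needs_py (context : List (String × String)) (current_session : Option (List (String × Int))) (predicted_tasks : List String) : List (String × Bool) :=
  let context_needs : PySem.Dict String Bool := PySem.Dict.mk
    [("session_continuity", false), ("memory_context", false), ("user_preferences", false),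
     ("historical_data", false), ("external_data", false)]
  let context_needs := if pvSessionFlag current_session then context_needs.insert "session_continuity" true else context_needs
  let memory_tasks := ["memory_search", "context_retrieval", "task_continuation", "research"]
  let context_needs := if memory_tasks.any (fun task => predicted_tasks.contains task) then context_needs.insert "memory_context" true else context_needs
  let personalized_tasks := ["visualization", "analysis", "summarization"]
  let context_needs := if personalized_tasks.any (fun task => predicted_tasks.contains task) then context_needs.insert "user_preferences" true else context_needs
  let analytical_tasks := ["data_analysis", "statistical_analysis", "trend_analysis"]
  let context_needs := if analytical_tasks.any (fun task => predicted_tasks.contains task) then context_needs.insert "historical_data" true else context_needs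
  let research_tasks := ["research", "information_search", "fact_checking"]
  let context_needs := if research_tasks.any (fun task => predicted_tasks.contains task) then context_needs.insert "external_data" true else context_needs
  context_needs.items

-- ===== PORT B =====
def pvNeedTable : PySem.Dict String (List String) := PySem.Dict.mk
  [("memory_search", ["memory_context"]), ("context_retrieval", ["memory_context"]),
   ("task_continuation", ["memory_context"]), ("research", ["memory_context", "external_data"]),
   ("visualization", ["user_preferences"]), ("analysis", ["user_preferences"]),
   ("summarization", ["user_preferences"]), ("data_analysis", ["historical_data"]),
   ("statistical_analysis", ["historical_data"]), ("trend_analysis", ["historical_data"]),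
   ("information_search", ["external_data"]), ("fact_checking", ["external_data"])]

def predict_context_needs_py_alt (context : List (String × String)) (current_session : Option (List (String × Int))) (predicted_tasks : List String) : List (String × Bool) :=
  let context_needs : PySem.Dict String Bool := PySem.Dict.mk
    [("session_continuity", false), ("memory_context", false), ("user_preferences", false),
     ("historical_data", false), ("external_data", false)]
  let context_needs := if pvSessionFlag current_session then context_needs.insert "session_continuity" true else context_needs
  let context_needs := predicted_tasks.foldl
    (fun nds task => (pvNeedTable.getD task []).foldl (fun m need => m.insert need true) nds)
    context_needs
  context_needs.items

-- ===== PRECONDITION & SPEC =====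
def Spec_predict_context_needs_py (context : List (String × String)) (current_session : Option (List (String × Int))) (predicted_tasks : List String) (out : List (String × Bool)) : Prop := out = predict_context_needs_py_alt context current_session predicted_tasks
instance (context : List (String × String)) (current_session : Option (List (String × Int))) (predicted_tasks : List String) (out : List (String × Bool)) : Decidable (Spec_predict_context_needs_py context current_session predicted_tasks out) := by unfold Spec_predict_context_needs_py; infer_instance

-- ===== CLAIM (what is proved, stated in full; the proofs are below) =====
def Claim_equal_predict_context_needs_py : Prop := ∀ (context : List (String × String)) (current_session : Option (List (String × Int))) (predicted_tasks : List String), Dom_predict_context_needs_py context current_session predicted_tasks → Spec_predict_context_needs_py context current_session predicted_tasks (predict_context_needs_py context current_session predicted_tasks)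

-- ===== LEMMAS AND PROOFS =====

-- the five-key needs dict with given flag values
def pvNeeds (b1 b2 b3 b4 b5 : Bool) : PySem.Dict String Bool := PySem.Dict.mk
  [("session_continuity", b1), ("memory_context", b2), ("user_preferences", b3),
   ("historical_data", b4), ("external_data", b5)]

theorem pv_step (task : String) (b1 b2 b3 b4 b5 : Bool) :
    (pvNeedTable.getD task []).foldl (fun m need => m.insert need true) (pvNeeds b1 b2 b3 b4 b5)
      = pvNeeds b1
          (b2 || ["memory_search", "context_retrieval", "task_continuation", "research"].contains task)
          (b3 || ["visualization", "analysis", "summarization"].contains task)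
          (b4 || ["data_analysis", "statistical_analysis", "trend_analysis"].contains task)
          (b5 || ["research", "information_search", "fact_checking"].contains task) := by
  by_cases h1 : task = "memory_search"
  · subst h1; revert b1 b2 b3 b4 b5; decide
  by_cases h2 : task = "context_retrieval"
  · subst h2; revert b1 b2 b3 b4 b5; decide
  by_cases h3 : task = "task_continuation"
  · subst h3; revert b1 b2 b3 b4 b5; decide
  by_cases h4 : task = "research"
  · subst h4; revert b1 b2 b3 b4 b5; decide
  by_cases h5 : task = "visualization"
  · subst h5; revert b1 b2 b3 b4 b5; decide
  by_cases h6 : task = "analysis"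
  · subst h6; revert b1 b2 b3 b4 b5; decide
  by_cases h7 : task = "summarization"
  · subst h7; revert b1 b2 b3 b4 b5; decide
  by_cases h8 : task = "data_analysis"
  · subst h8; revert b1 b2 b3 b4 b5; decide
  by_cases h9 : task = "statistical_analysis"
  · subst h9; revert b1 b2 b3 b4 b5; decide
  by_cases h10 : task = "trend_analysis"
  · subst h10; revert b1 b2 b3 b4 b5; decide
  by_cases h11 : task = "information_search"
  · subst h11; revert b1 b2 b3 b4 b5; decide
  by_cases h12 : task = "fact_checking"
  · subst h12; revert b1 b2 b3 b4 b5; decide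
  have g : pvNeedTable.getD task [] = [] := by
    simp [pvNeedTable, PySem.Dict.getD_eq_get?_getD, PySem.Dict.get?, beq_iff_eq,
      Ne.symm h1, Ne.symm h2, Ne.symm h3, Ne.symm h4, Ne.symm h5, Ne.symm h6, Ne.symm h7, Ne.symm h8, Ne.symm h9, Ne.symm h10, Ne.symm h11, Ne.symm h12]
  rw [g]
  simp [List.contains_eq_mem, h1, h2, h3, h4, h5, h6, h7, h8, h9, h10, h11, h12]

theorem pv_fold (l : List String) (b1 b2 b3 b4 b5 : Bool) :
    l.foldl (fun nds task => (pvNeedTable.getD task []).foldl (fun m need => m.insert need true) nds)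
        (pvNeeds b1 b2 b3 b4 b5)
      = pvNeeds b1
          (b2 || l.any (["memory_search", "context_retrieval", "task_continuation", "research"].contains ·))
          (b3 || l.any (["visualization", "analysis", "summarization"].contains ·))
          (b4 || l.any (["data_analysis", "statistical_analysis", "trend_analysis"].contains ·))
          (b5 || l.any (["research", "information_search", "fact_checking"].contains ·)) := by
  induction l generalizing b2 b3 b4 b5 with
  | nil => simp
  | cons t ts ih =>
    simp only [List.foldl_cons, pv_step, ih, List.any_cons, Bool.or_assoc]

theorem pv_any_comm (xs ys : List String) :
    xs.any (fun x => ys.contains x) = ys.any (fun y => xs.contains y) := by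
  rw [Bool.eq_iff_iff]
  constructor <;>
  · simp only [List.any_eq_true]
    rintro ⟨x, hx, hc⟩
    exact ⟨x, by simpa using hc, by simpa using hx⟩

theorem pv_init :
    (PySem.Dict.mk [("session_continuity", false), ("memory_context", false), ("user_preferences", false),
      ("historical_data", false), ("external_data", false)] : PySem.Dict String Bool)
      = pvNeeds false false false false false := rfl

theorem pv_if_sess (c : Bool) :
    (if c then (pvNeeds false false false false false).insert "session_continuity" true
     else pvNeeds false false false false false) = pvNeeds c false false false false := by
  cases c <;> decide

theorem pv_if_mem (c s1 : Bool) :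
    (if c then (pvNeeds s1 false false false false).insert "memory_context" true
     else pvNeeds s1 false false false false) = pvNeeds s1 c false false false := by
  cases c <;> cases s1 <;> decide

theorem pv_if_pref (c s1 m : Bool) :
    (if c then (pvNeeds s1 m false false false).insert "user_preferences" true
     else pvNeeds s1 m false false false) = pvNeeds s1 m c false false := by
  cases c <;> cases s1 <;> cases m <;> decide

theorem pv_if_hist (c s1 m p : Bool) :
    (if c then (pvNeeds s1 m p false false).insert "historical_data" true
     else pvNeeds s1 m p false false) = pvNeeds s1 m p c false := by
  cases c <;> cases s1 <;> cases m <;> cases p <;> decide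

theorem pv_if_ext (c s1 m p a : Bool) :
    (if c then (pvNeeds s1 m p a false).insert "external_data" true
     else pvNeeds s1 m p a false) = pvNeeds s1 m p a c := by
  cases c <;> cases s1 <;> cases m <;> cases p <;> cases a <;> decide

-- ===== VERDICT (by name: the statement is the Claim_ definition above) =====
theorem predict_context_needs_py_spec : Claim_equal_predict_context_needs_py := by
  intro context current_session predicted_tasks _
  unfold Spec_predict_context_needs_py
  simp only [predict_context_needs_py, predict_context_needs_py_alt]
  rw [pv_init, pv_if_sess, pv_if_mem, pv_if_pref, pv_if_hist, pv_if_ext, pv_fold]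
  simp only [Bool.false_or]
  rw [pv_any_comm predicted_tasks ["memory_search", "context_retrieval", "task_continuation", "research"],
      pv_any_comm predicted_tasks ["visualization", "analysis", "summarization"],
      pv_any_comm predicted_tasks ["data_analysis", "statistical_analysis", "trend_analysis"],
      pv_any_comm predicted_tasks ["research", "information_search", "fact_checking"]]
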